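-- pv_equiv track=rewrite | github.com/JungBlanc/algorithm | programers/allBFS.py | BFS
-- ===== SOURCE A (Python) =====
-- def BFS(arr, target):
--     visited_node = [0]
--
--     for i in arr:
--         tempArr = []
--         for j in visited_node:
--             tempArr.append(j+1)
--             tempArr.append(j-1)
--         visited_node = tempArr
--
--     return visited_node
-- ===== SOURCE B (Python) =====
-- def BFS(arr, target):
--     n = len(arr)
--     return [n - 2 * bin(i).count('1') for i in range(1 << n)]
-- ===== Notes on version B (the rewrite author's own statement) =====
-- stated objective: simpler
-- what changed: Replaces the iterative list-doubling (rebuilding the whole list each pass) with a closed-form comprehension: entry i is n - 2*popcount(i), computed directly by index.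
import Mathlib
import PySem

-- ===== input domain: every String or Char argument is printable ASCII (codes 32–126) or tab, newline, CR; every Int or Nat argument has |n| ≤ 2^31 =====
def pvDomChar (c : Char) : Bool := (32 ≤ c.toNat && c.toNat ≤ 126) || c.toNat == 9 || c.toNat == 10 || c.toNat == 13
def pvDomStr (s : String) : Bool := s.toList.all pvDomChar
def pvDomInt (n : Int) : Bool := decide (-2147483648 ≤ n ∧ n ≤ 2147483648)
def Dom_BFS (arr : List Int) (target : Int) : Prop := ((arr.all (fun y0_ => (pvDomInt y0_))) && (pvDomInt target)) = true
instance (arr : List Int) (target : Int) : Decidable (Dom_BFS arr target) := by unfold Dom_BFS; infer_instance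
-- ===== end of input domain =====

-- B replaces A's iterative list-doubling with a closed form (entry i = n - 2*popcount i); simpler, same output.

-- ===== PORT A =====
-- for i in arr: visited = flatMap j ↦ [j+1, j-1]  (the inner append-loop builds exactly this list)
def BFS (arr : List Int) (target : Int) : List Int :=
  arr.foldl (fun visited _ => visited.flatMap (fun j => [j + 1, j - 1])) [0]

-- ===== PORT B =====
-- bin(i).count('1'): popcount of a natural number, ported by hand (exact: binary digit sum)
def pvPopcount (n : Nat) : Nat :=
  if h : n = 0 then 0 else pvPopcount (n / 2) + n % 2
decreasing_by exact Nat.div_lt_self (Nat.pos_of_ne_zero h) (by norm_num)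

def BFS_alt (arr : List Int) (target : Int) : List Int :=
  (List.range (2 ^ arr.length)).map (fun i => (arr.length : Int) - 2 * (pvPopcount i : Int))

-- ===== PRECONDITION & SPEC =====
def Spec_BFS (arr : List Int) (target : Int) (out : List Int) : Prop := out = BFS_alt arr target
instance (arr : List Int) (target : Int) (out : List Int) : Decidable (Spec_BFS arr target out) := by unfold Spec_BFS; infer_instance

-- ===== CLAIM (what is proved, stated in full; the proofs are below) =====
def Claim_equal_BFS : Prop := ∀ (arr : List Int) (target : Int), Dom_BFS arr target → Spec_BFS arr target (BFS arr target)

-- ===== LEMMAS AND PROOFS =====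

theorem pvPopcount_zero : pvPopcount 0 = 0 := by rw [pvPopcount]; rfl

theorem pvPopcount_step (j : Nat) : pvPopcount (2 * j) = pvPopcount j ∧ pvPopcount (2 * j + 1) = pvPopcount j + 1 := by
  constructor
  · rcases Nat.eq_zero_or_pos j with h | h
    · subst h; rfl
    · rw [pvPopcount]
      simp [Nat.mul_mod_right, Nat.ne_of_gt (by omega : 0 < 2 * j)]
  · rw [pvPopcount]
    have h1 : (2 * j + 1) / 2 = j := by omega
    have h2 : (2 * j + 1) % 2 = 1 := by omega
    simp [h1, h2]

theorem doubling_step (m : Nat) (g : Nat → Int) :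
    ((List.range m).map g).flatMap (fun j => [j + 1, j - 1]) =
      (List.range (2 * m)).map (fun j => g (j / 2) + 1 - 2 * ((j % 2 : Nat) : Int)) := by
  induction m with
  | zero => simp
  | succ m ih =>
    have h2 : 2 * (m + 1) = (2 * m + 1) + 1 := by ring
    rw [List.range_succ, h2, List.range_succ, List.range_succ]
    simp only [List.map_append, List.flatMap_append, ih, List.map_cons, List.map_nil,
      List.flatMap_cons, List.flatMap_nil]
    have e1 : (2 * m) / 2 = m := by omega
    have e2 : (2 * m) % 2 = 0 := by omega
    have e3 : (2 * m + 1) / 2 = m := by omega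
    have e4 : (2 * m + 1) % 2 = 1 := by omega
    simp [e1, e2, e3, e4]
    ring

theorem BFS_closed (arr : List Int) :
    BFS arr 0 = (List.range (2 ^ arr.length)).map (fun i => (arr.length : Int) - 2 * (pvPopcount i : Int)) := by
  unfold BFS
  induction arr with
  | nil => simp [pvPopcount_zero]
  | cons a l ih =>
    have step : ∀ (init : List Int) (b : Int) (l : List Int),
        (b :: l).foldl (fun visited (_ : Int) => visited.flatMap (fun j => [j + 1, j - 1])) init =
        l.foldl (fun visited _ => visited.flatMap (fun j => [j + 1, j - 1]))
          (init.flatMap (fun j => [j + 1, j - 1])) := by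
      intro init b l; rfl
    -- foldl ignores the element: result over (a :: l) from [0] = one doubling step applied after folding l
    have key : ∀ (init : List Int) (l : List Int),
        l.foldl (fun visited (_ : Int) => visited.flatMap (fun j => [j + 1, j - 1]))
          (init.flatMap (fun j => [j + 1, j - 1])) =
        (l.foldl (fun visited _ => visited.flatMap (fun j => [j + 1, j - 1])) init).flatMap
          (fun j => [j + 1, j - 1]) := by
      intro init l
      induction l generalizing init with
      | nil => rfl
      | cons b t iht => simpa using iht (init.flatMap (fun j => [j + 1, j - 1]))
    rw [step, key, ih, doubling_step]
    have hlen : 2 ^ (a :: l).length = 2 * 2 ^ l.length := by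
      simp [List.length_cons, pow_succ]; ring
    rw [hlen]
    apply List.map_congr_left
    intro j hj
    have hq : j = 2 * (j / 2) + j % 2 := (Nat.div_add_mod' j 2).symm ▸ by omega
    rcases Nat.mod_two_eq_zero_or_one j with h | h
    · have : pvPopcount j = pvPopcount (j / 2) := by
        conv_lhs => rw [show j = 2 * (j / 2) by omega]
        exact (pvPopcount_step (j / 2)).1
      simp [h, this, List.length_cons]
      ring
    · have : pvPopcount j = pvPopcount (j / 2) + 1 := by
        conv_lhs => rw [show j = 2 * (j / 2) + 1 by omega]
        exact (pvPopcount_step (j / 2)).2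
      simp [h, this, List.length_cons]
      ring

-- ===== VERDICT (by name: the statement is the Claim_ definition above) =====
theorem BFS_spec : Claim_equal_BFS := by
  intro arr target _
  unfold Spec_BFS BFS_alt
  have h : BFS arr target = BFS arr 0 := rfl
  rw [h, BFS_closed]
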